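-- pv_equiv track=rewrite | github.com/sahithsundarw/sentinel | update_blog_links.py | create_hf_version
-- ===== SOURCE A (Python) =====
-- HF_FRONTMATTER = """---
-- title: "Guardrail Arena: Training AI Safety Agents with Multi-Agent RL"
-- thumbnail: /blog/assets/guardrail-arena/reward_curves.png
-- authors:
-- - user: varunventra
-- - user: sahithsundarw
-- - user: pranush
-- ---
--
-- """
--
-- def create_hf_version(content: str) -> str:
--     """Create HF blog version: strip the H1 title line, add frontmatter."""
--     # Remove the first H1 heading line if present (it becomes the title field)
--     lines = content.split("\n")
--     body_lines = []
--     skipped_h1 = False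
--     for line in lines:
--         if not skipped_h1 and line.startswith("# "):
--             skipped_h1 = True
--             continue  # drop H1 — it becomes the title in frontmatter
--         body_lines.append(line)
--     body = "\n".join(body_lines).lstrip("\n")
--     return HF_FRONTMATTER + body
-- ===== SOURCE B (Python) =====
-- HF_FRONTMATTER = """---
-- title: "Guardrail Arena: Training AI Safety Agents with Multi-Agent RL"
-- thumbnail: /blog/assets/guardrail-arena/reward_curves.png
-- authors:
-- - user: varunventra
-- - user: sahithsundarw
-- - user: pranush
-- ---
--
-- """
--
-- def create_hf_version(content: str) -> str:
--     """Create HF blog version: strip the H1 title line, add frontmatter."""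
--     # Work on the raw string: a sentinel newline makes every line (including the
--     # first) start with "\n", so the first H1 line is the first occurrence of
--     # "\n# "; cut from there to the next newline.  No line list is ever built.
--     probe = "\n" + content
--     j = probe.find("\n# ")
--     if j == -1:
--         body = probe
--     else:
--         end = probe.find("\n", j + 1)
--         body = probe[:j] if end == -1 else probe[:j] + probe[end:]
--     return HF_FRONTMATTER + body.lstrip("\n")
-- ===== Notes on version B (the rewrite author's own statement) =====
-- stated objective: alternative
-- what changed: B never builds a list of lines: it prepends a sentinel newline and works on the raw string with two substring searches (find '\n# ', then the next '\n') and one slice-splice, where A splits into lines, filters with a flag in a loop, and rejoins.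
import Mathlib
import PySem

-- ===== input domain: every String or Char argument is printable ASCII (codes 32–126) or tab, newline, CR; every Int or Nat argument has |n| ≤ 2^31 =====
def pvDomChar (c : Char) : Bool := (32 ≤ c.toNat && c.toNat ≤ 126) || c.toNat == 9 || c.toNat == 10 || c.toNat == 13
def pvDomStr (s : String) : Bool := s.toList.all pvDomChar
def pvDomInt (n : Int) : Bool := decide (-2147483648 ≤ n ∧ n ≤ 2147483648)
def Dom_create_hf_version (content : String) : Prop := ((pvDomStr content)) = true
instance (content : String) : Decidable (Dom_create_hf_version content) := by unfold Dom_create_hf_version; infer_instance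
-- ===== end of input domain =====

-- B avoids building a list of lines: it prepends a sentinel newline and works on the
-- raw string with two substring searches and one slice-splice (alternative algorithm).

-- the module constant HF_FRONTMATTER, as code points
def hfFrontmatter : List Char :=
  ("---\ntitle: \"Guardrail Arena: Training AI Safety Agents with Multi-Agent RL\"\nthumbnail: /blog/assets/guardrail-arena/reward_curves.png\nauthors:\n- user: varunventra\n- user: sahithsundarw\n- user: pranush\n---\n\n").toList

-- ===== PORT A =====
-- '.lstrip("\n")' ported by hand as dropWhile (· == '\n'): exact, it drops exactly the leading '\n' characters
def create_hf_version (content : String) : String :=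
  let lines := PySem.Chars.splitOn content.toList "\n".toList
  let st := lines.foldl
    (fun (acc : List (List Char) × Bool) line =>
      if !acc.2 && PySem.Chars.startswith line "# ".toList then (acc.1, true)
      else (acc.1 ++ [line], acc.2))
    ([], false)
  let body := (PySem.Chars.join "\n".toList st.1).dropWhile (· == '\n')
  String.ofList (hfFrontmatter ++ body)

-- ===== PORT B =====
-- probe = "\n" + content; find "\n# "; cut from there to the next "\n".
-- '.lstrip("\n")' ported by hand as dropWhile (· == '\n'): exact
def create_hf_version_alt (content : String) : String :=
  let probe := '\n' :: content.toList
  let j := PySem.Chars.find probe "\n# ".toList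
  let body :=
    if j = -1 then probe
    else
      let e := PySem.Chars.findFrom probe "\n".toList (j + 1)
      if e = -1 then PySem.List.slice probe none (some j)
      else PySem.List.slice probe none (some j) ++ PySem.List.slice probe (some e) none
  String.ofList (hfFrontmatter ++ body.dropWhile (· == '\n'))

-- ===== PRECONDITION & SPEC =====
def Spec_create_hf_version (content : String) (out : String) : Prop := out = create_hf_version_alt content
instance (content : String) (out : String) : Decidable (Spec_create_hf_version content out) := by unfold Spec_create_hf_version; infer_instance

-- ===== CLAIM (what is proved, stated in full; the proofs are below) =====
def Claim_equal_create_hf_version : Prop := ∀ (content : String), Dom_create_hf_version content → Spec_create_hf_version content (create_hf_version content)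

-- ===== LEMMAS AND PROOFS =====

-- B's body computation, on the raw character list (mirrors the port of B)
def gBody (probe : List Char) : List Char :=
  let j := PySem.Chars.find probe ['\n', '#', ' ']
  if j = -1 then probe
  else
    let e := PySem.Chars.findFrom probe ['\n'] (j + 1)
    if e = -1 then PySem.List.slice probe none (some j)
    else PySem.List.slice probe none (some j) ++ PySem.List.slice probe (some e) none

-- the locate-then-splice value A's flag loop computes
def spl (lines : List (List Char)) : List (List Char) :=
  match lines.findIdx? (fun line => PySem.Chars.startswith line ['#', ' ']) with
  | none => lines
  | some i => lines.take i ++ lines.drop (i + 1)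

-- the one case where removing the H1 leaves nothing: the input is a single H1 line
def killedAll (lines : List (List Char)) : Bool :=
  match lines with
  | [h] => PySem.Chars.startswith h ['#', ' ']
  | _ => false

-- once the H1 has been skipped, the loop just appends every remaining line
theorem loop_flag_true (p : List Char → Bool) (lines : List (List Char)) (acc : List (List Char)) :
    (lines.foldl
      (fun (s : List (List Char) × Bool) line =>
        if !s.2 && p line then (s.1, true) else (s.1 ++ [line], s.2))
      (acc, true)).1 = acc ++ lines := by
  induction lines generalizing acc with
  | nil => simp
  | cons l ls ih =>
    rw [List.foldl_cons]
    simp only [Bool.not_true, Bool.false_and, Bool.false_eq_true, if_false]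
    rw [ih]
    simp

-- A's flag loop computes exactly the locate-then-splice value
theorem spl_cons_pos (l : List Char) (ls : List (List Char))
    (hp : PySem.Chars.startswith l ['#', ' '] = true) : spl (l :: ls) = ls := by
  unfold spl
  rw [List.findIdx?_cons]
  simp [hp]

theorem spl_cons_neg (l : List Char) (ls : List (List Char))
    (hp : PySem.Chars.startswith l ['#', ' '] = false) : spl (l :: ls) = l :: spl ls := by
  unfold spl
  rw [List.findIdx?_cons]
  simp only [hp, Bool.false_eq_true, if_false]
  cases h : ls.findIdx? (fun line => PySem.Chars.startswith line ['#', ' ']) with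
  | none => simp [h]
  | some i => simp [h, List.take_succ_cons, List.drop_succ_cons]

theorem loop_eq_splice (lines : List (List Char)) (acc : List (List Char)) :
    (lines.foldl
      (fun (s : List (List Char) × Bool) line =>
        if !s.2 && PySem.Chars.startswith line "# ".toList then (s.1, true) else (s.1 ++ [line], s.2))
      (acc, false)).1 = acc ++ spl lines := by
  induction lines generalizing acc with
  | nil => simp [spl]
  | cons l ls ih =>
    rw [List.foldl_cons]
    cases hp : PySem.Chars.startswith l "# ".toList with
    | true =>
      simp only [Bool.not_false, Bool.true_and, hp, if_true]
      rw [loop_flag_true, spl_cons_pos l ls hp]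
    | false =>
      simp only [Bool.not_false, Bool.true_and, hp, Bool.false_eq_true, if_false]
      rw [ih, spl_cons_neg l ls hp]
      simp

-- ---- characterisation of PySem.Chars.splitOn by List.splitOnP ----

theorem splitOnP_ne_nil (p : Char → Bool) (l : List Char) : List.splitOnP p l ≠ [] := by
  induction l with
  | nil => simp [List.splitOnP_nil]
  | cons c r ih =>
    rw [List.splitOnP_cons]
    split
    · simp
    · cases h : List.splitOnP p r with
      | nil => exact absurd h ih
      | cons a t => simp [h]

theorem splitOn_go_eq (fuel : Nat) (l cur : List Char) (acc : List (List Char)) (h : l.length < fuel) :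
    PySem.Chars.splitOn.go ['\n'] fuel l cur acc =
      acc.reverse ++ (List.splitOnP (· == '\n') l).modifyHead (cur.reverse ++ ·) := by
  induction fuel generalizing l cur acc with
  | zero => omega
  | succ f ih =>
    cases l with
    | nil =>
      rw [PySem.Chars.splitOn.go.eq_def]
      simp [List.splitOnP_nil]
    | cons c r =>
      rw [PySem.Chars.splitOn.go.eq_def]
      by_cases hc : c = '\n'
      · subst hc
        have hpre : List.isPrefixOf ['\n'] ('\n' :: r) = true := by
          simp [List.isPrefixOf]
        simp only [hpre, if_true]
        have hdl : List.drop ['\n'].length ('\n' :: r) = r := rfl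
        rw [hdl]
        rw [ih r [] (cur.reverse :: acc) (by simpa using Nat.lt_of_succ_lt_succ h)]
        rw [List.splitOnP_cons]
        simp only [List.drop_succ_cons, List.drop_zero, BEq.rfl, if_true]
        cases hsp : List.splitOnP (· == '\n') r with
        | nil => exact absurd hsp (splitOnP_ne_nil _ _)
        | cons a t => simp
      · have hpre : List.isPrefixOf ['\n'] (c :: r) = false := by
          cases hb : List.isPrefixOf ['\n'] (c :: r) with
          | false => rfl
          | true =>
            exact absurd hb (by simp [List.isPrefixOf]; exact fun hh => absurd hh.symm hc)
        simp only [hpre, Bool.false_eq_true, if_false]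
        rw [ih r (c :: cur) acc (by simpa using Nat.lt_of_succ_lt_succ h)]
        rw [List.splitOnP_cons]
        have hcb : (c == '\n') = false := by simpa using hc
        simp only [hcb, Bool.false_eq_true, if_false]
        cases hsp : List.splitOnP (· == '\n') r with
        | nil => exact absurd hsp (splitOnP_ne_nil _ _)
        | cons a t => simp

theorem splitOn_eq (s : List Char) :
    PySem.Chars.splitOn s ['\n'] = List.splitOnP (· == '\n') s := by
  unfold PySem.Chars.splitOn
  rw [splitOn_go_eq s.length.succ s [] [] (Nat.lt_succ_self _)]
  rw [List.reverse_nil, List.nil_append]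
  cases hsp : List.splitOnP (· == '\n') s with
  | nil => exact absurd hsp (splitOnP_ne_nil _ _)
  | cons a t => simp

theorem splitOnP_clean (l : List Char) :
    ∀ piece ∈ List.splitOnP (· == '\n') l, '\n' ∉ piece := by
  induction l with
  | nil => simp [List.splitOnP_nil]
  | cons c r ih =>
    rw [List.splitOnP_cons]
    by_cases hc : c = '\n'
    · subst hc
      simp only [BEq.rfl, if_true]
      intro piece hmem
      rcases List.mem_cons.1 hmem with rfl | hmem
      · simp
      · exact ih piece hmem
    · have hcb : (c == '\n') = false := by simpa using hc
      simp only [hcb, Bool.false_eq_true, if_false]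
      cases hsp : List.splitOnP (· == '\n') r with
      | nil => exact absurd hsp (splitOnP_ne_nil _ _)
      | cons a t =>
        intro piece hmem
        rcases List.mem_cons.1 hmem with rfl | hmem
        · intro hin
          rcases List.mem_cons.1 hin with heq | hin
          · exact hc heq.symm
          · exact ih a (hsp ▸ List.mem_cons_self) hin
        · exact ih piece (hsp ▸ List.mem_cons_of_mem a hmem)

theorem splitOnP_intercalate (l : List Char) :
    List.intercalate ['\n'] (List.splitOnP (· == '\n') l) = l := by
  have := List.intercalate_splitOn l '\n'
  simpa [List.splitOn] using this

-- ---- small intercalate facts ----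

theorem intercalate_singleton (sep l : List Char) : List.intercalate sep [l] = l := by
  simp [List.intercalate]

theorem intercalate_cons_ne (sep l : List Char) (ls : List (List Char)) (h : ls ≠ []) :
    List.intercalate sep (l :: ls) = l ++ sep ++ List.intercalate sep ls := by
  cases ls with
  | nil => exact absurd rfl h
  | cons a as => simp [List.intercalate, List.intersperse]

-- ---- find lemmas ----

theorem infix_of_prefix_drop {sub s : List Char} {j : Nat} (h : sub <+: s.drop j) : sub <:+: s :=
  (PySem.Chars.isIn_iff_infix sub s).1 ((PySem.Chars.exists_prefix_drop_iff_isIn sub s).1 ⟨j, h⟩)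

theorem find_eq_of {s sub : List Char} (n : Nat) (h1 : sub <+: s.drop n)
    (h2 : ∀ k < n, ¬ sub <+: s.drop k) : PySem.Chars.find s sub = (n : Int) := by
  have hinf : 0 ≤ PySem.Chars.find s sub :=
    (PySem.Chars.find_nonneg_iff s sub).2 (infix_of_prefix_drop h1)
  obtain ⟨hpre, hmin⟩ := PySem.Chars.find_spec hinf
  have ht : (PySem.Chars.find s sub).toNat = n := by
    rcases lt_trichotomy (PySem.Chars.find s sub).toNat n with h | h | h
    · exact absurd hpre (h2 _ h)
    · exact h
    · exact absurd h1 (hmin n h)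
  omega

theorem find_neg {s sub : List Char} (h : ∀ k, ¬ sub <+: s.drop k) :
    PySem.Chars.find s sub = -1 := by
  rw [PySem.Chars.find_eq_neg_one_iff]
  intro hinf
  obtain ⟨j, hj⟩ := (PySem.Chars.exists_prefix_drop_iff_isIn sub s).2
    ((PySem.Chars.isIn_iff_infix sub s).2 hinf)
  exact h j hj

theorem find_lt_length {s sub : List Char} (hs : 0 ≤ PySem.Chars.find s sub) (hne : sub ≠ []) :
    (PySem.Chars.find s sub).toNat < s.length := by
  have hpre := (PySem.Chars.find_spec hs).1
  have hlen := hpre.length_le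
  have hpos : 0 < sub.length := List.length_pos_of_ne_nil hne
  simp [List.length_drop] at hlen
  omega

-- '\n' cannot start inside a newline-free block
theorem not_nl_prefix_at (l rest ys : List Char) (hc : '\n' ∉ l) (k : Nat) (hk : k < l.length) :
    ¬ (('\n' :: ys) <+: l.drop k ++ rest) := by
  intro h
  rw [List.drop_eq_getElem_cons hk, List.cons_append, List.cons_prefix_cons] at h
  exact hc (h.1 ▸ l.getElem_mem hk)

-- "\n# " cannot be a prefix at a boundary before a non-H1 line
theorem not_prefix_head (l rest : List Char)
    (hp : PySem.Chars.startswith l ['#', ' '] = false)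
    (hr : rest = [] ∨ ∃ t, rest = '\n' :: t) :
    ¬ (['\n', '#', ' '] <+: ('\n' :: l) ++ rest) := by
  intro h
  rw [List.cons_append, List.cons_prefix_cons] at h
  have h2 : ['#', ' '] <+: l ++ rest := h.2
  cases l with
  | nil =>
    rcases hr with rfl | ⟨t, rfl⟩
    · simp at h2
    · rw [List.nil_append, List.cons_prefix_cons] at h2
      exact absurd h2.1.symm (by decide)
  | cons a l' =>
    cases l' with
    | nil =>
      rw [List.cons_append, List.cons_prefix_cons] at h2
      rcases hr with rfl | ⟨t, rfl⟩
      · simp at h2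
      · obtain ⟨-, h3⟩ := h2
        rw [List.nil_append, List.cons_prefix_cons] at h3
        exact absurd h3.1.symm (by decide)
    | cons b l'' =>
      rw [List.cons_append, List.cons_prefix_cons] at h2
      obtain ⟨rfl, h3⟩ := h2
      rw [List.cons_append, List.cons_prefix_cons] at h3
      obtain ⟨rfl, -⟩ := h3
      simp [PySem.Chars.startswith, List.isPrefixOf] at hp

-- the first "\n# " in ('\n'::l) ++ rest, l a clean non-H1 line, rest a line boundary or empty
theorem find_shift (l rest : List Char) (hc : '\n' ∉ l)
    (hp : PySem.Chars.startswith l ['#', ' '] = false)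
    (hr : rest = [] ∨ ∃ t, rest = '\n' :: t) :
    PySem.Chars.find (('\n' :: l) ++ rest) ['\n', '#', ' '] =
      if PySem.Chars.find rest ['\n', '#', ' '] = -1 then -1
      else ((l.length : Int) + 1) + PySem.Chars.find rest ['\n', '#', ' '] := by
  have hdropIn : ∀ k : Nat, 1 ≤ k → k ≤ l.length →
      (('\n' :: l) ++ rest).drop k = l.drop (k - 1) ++ rest := by
    intro k hk1 hk2
    cases k with
    | zero => omega
    | succ k' =>
      rw [List.cons_append, List.drop_succ_cons,
        List.drop_append_of_le_length (by omega)]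
      simp
  have hdropOut : ∀ i : Nat,
      (('\n' :: l) ++ rest).drop (l.length + 1 + i) = rest.drop i := by
    intro i
    have : l.length + 1 + i = ('\n' :: l).length + i := by simp
    rw [this, List.drop_append]
    try simp
  split_ifs with hrf
  · apply find_neg
    intro k
    rcases Nat.lt_or_ge k 1 with hk | hk
    · interval_cases k
      exact not_prefix_head l rest hp hr
    · by_cases hk2 : k ≤ l.length
      · rw [hdropIn k hk hk2]
        exact not_nl_prefix_at l rest ['#', ' '] hc (k - 1) (by omega)
      · have : k = l.length + 1 + (k - (l.length + 1)) := by omega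
        rw [this, hdropOut]
        intro hpre
        exact absurd (infix_of_prefix_drop hpre)
          ((PySem.Chars.find_eq_neg_one_iff rest ['\n', '#', ' ']).1 hrf)
  · have h0 : 0 ≤ PySem.Chars.find rest ['\n', '#', ' '] := by
      have := PySem.Chars.neg_one_le_find rest ['\n', '#', ' ']
      omega
    obtain ⟨hpre, hmin⟩ := PySem.Chars.find_spec h0
    set fn := (PySem.Chars.find rest ['\n', '#', ' ']).toNat with hfn
    have hres : PySem.Chars.find (('\n' :: l) ++ rest) ['\n', '#', ' ']
        = ((l.length + 1 + fn : Nat) : Int) := by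
      apply find_eq_of (l.length + 1 + fn)
      · rw [hdropOut fn]; exact hpre
      · intro k hklt
        rcases Nat.lt_or_ge k 1 with hk | hk
        · interval_cases k
          exact not_prefix_head l rest hp hr
        · by_cases hk2 : k ≤ l.length
          · rw [hdropIn k hk hk2]
            exact not_nl_prefix_at l rest ['#', ' '] hc (k - 1) (by omega)
          · have hke : k = l.length + 1 + (k - (l.length + 1)) := by omega
            rw [hke, hdropOut]
            exact hmin _ (by omega)
    rw [hres]
    push_cast
    omega

theorem find_nil_sub : PySem.Chars.find [] ['\n', '#', ' '] = -1 := by decide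

theorem find_nl_clean (l : List Char) (hc : '\n' ∉ l) : PySem.Chars.find l ['\n'] = -1 := by
  apply find_neg
  intro k h
  cases hd : l.drop k with
  | nil => rw [hd] at h; simp at h
  | cons a t =>
    rw [hd, List.cons_prefix_cons] at h
    exact hc (h.1 ▸ List.mem_of_mem_drop (hd ▸ List.mem_cons_self))

theorem find_nl_boundary (l t : List Char) (hc : '\n' ∉ l) :
    PySem.Chars.find (l ++ '\n' :: t) ['\n'] = (l.length : Int) := by
  apply find_eq_of
  · rw [List.drop_left]
    simp [List.cons_prefix_cons]
  · intro k hk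
    rw [List.drop_append_of_le_length (by omega)]
    exact not_nl_prefix_at l ('\n' :: t) [] hc k hk

-- ---- gBody on line structure ----

theorem toList_nl : "\n".toList = ['\n'] := rfl

-- B's splice commutes with prepending a clean non-H1 line
theorem gBody_shift (l t : List Char) (hc : '\n' ∉ l)
    (hp : PySem.Chars.startswith l ['#', ' '] = false) :
    gBody (('\n' :: l) ++ ('\n' :: t)) = ('\n' :: l) ++ gBody ('\n' :: t) := by
  unfold gBody
  rw [find_shift l ('\n' :: t) hc hp (Or.inr ⟨t, rfl⟩)]
  by_cases hrf : PySem.Chars.find ('\n' :: t) ['\n', '#', ' '] = -1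
  · simp [hrf]
  · simp only [hrf, if_false]
    have h0 : 0 ≤ PySem.Chars.find ('\n' :: t) ['\n', '#', ' '] := by
      have := PySem.Chars.neg_one_le_find ('\n' :: t) ['\n', '#', ' ']
      omega
    set f := PySem.Chars.find ('\n' :: t) ['\n', '#', ' '] with hf
    set fn := f.toNat with hfn
    have hflt : fn < ('\n' :: t).length := find_lt_length h0 (by decide)
    have hflt' : fn < t.length + 1 := by simpa using hflt
    have hfe : f = (fn : Int) := by omega
    have hne2 : ¬ ((l.length : Int) + 1 + f = -1) := by omega
    simp only [hne2, if_false]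
    -- rewrite the start indices as Nat casts
    have hidx : (l.length : Int) + 1 + f + 1 = ((l.length + 1 + (fn + 1) : Nat) : Int) := by
      push_cast; omega
    have hidx2 : f + 1 = ((fn + 1 : Nat) : Int) := by push_cast; omega
    have hlen1 : l.length + 1 + (fn + 1) ≤ (('\n' :: l) ++ ('\n' :: t)).length := by
      simp [List.length_append]; omega
    have hlen2 : fn + 1 ≤ ('\n' :: t).length := by omega
    rw [hidx, hidx2,
      PySem.Chars.findFrom_natCast _ _ _ hlen1,
      PySem.Chars.findFrom_natCast _ _ _ hlen2]
    have hdrop : (('\n' :: l) ++ ('\n' :: t)).drop (l.length + 1 + (fn + 1))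
        = ('\n' :: t).drop (fn + 1) := by
      have : l.length + 1 + (fn + 1) = ('\n' :: l).length + (fn + 1) := by simp
      rw [this, List.drop_append]
      simp
    rw [hdrop]
    by_cases hd : PySem.Chars.find (('\n' :: t).drop (fn + 1)) ['\n'] = -1
    · simp only [hd, if_true]
      -- both e's are -1: bodies are the take-slices
      rw [PySem.List.slice_to _ (by omega), PySem.List.slice_to _ (by omega)]
      have h1 : ((l.length : Int) + 1 + f).toNat = ('\n' :: l).length + fn := by
        simp; omega
      have h2 : f.toNat = fn := rfl
      rw [h1, h2, List.take_append]
      rw [List.take_of_length_le (by simp)]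
      simp
    · simp only [hd, if_false]
      have hd0 : 0 ≤ PySem.Chars.find (('\n' :: t).drop (fn + 1)) ['\n'] := by
        have := PySem.Chars.neg_one_le_find (('\n' :: t).drop (fn + 1)) ['\n']
        omega
      set d := PySem.Chars.find (('\n' :: t).drop (fn + 1)) ['\n'] with hdd
      have hne3 : ¬ ((l.length + 1 + (fn + 1) : Nat) : Int) + d = -1 := by
        push_cast; omega
      have hne4 : ¬ ((fn + 1 : Nat) : Int) + d = -1 := by push_cast; omega
      simp only [hne3, hne4, if_false]
      rw [PySem.List.slice_to _ (by omega), PySem.List.slice_to _ (by omega),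
        PySem.List.slice_from _ (by positivity), PySem.List.slice_from _ (by positivity)]
      have h1 : ((l.length : Int) + 1 + f).toNat = ('\n' :: l).length + fn := by
        simp; omega
      have h2 : f.toNat = fn := rfl
      have h3 : (((l.length + 1 + (fn + 1) : Nat) : Int) + d).toNat
          = ('\n' :: l).length + (fn + 1 + d.toNat) := by simp; omega
      have h4 : (((fn + 1 : Nat) : Int) + d).toNat = fn + 1 + d.toNat := by omega
      rw [h1, h2, h3, h4, List.take_append, List.drop_append]
      rw [List.take_of_length_le (by simp),
        List.drop_eq_nil_of_le (by simp)]
      simp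

-- the exact value of B's splice on a newline-joined list of clean lines
theorem gBody_flat (lines : List (List Char)) (hne : lines ≠ [])
    (hcl : ∀ l ∈ lines, '\n' ∉ l) :
    gBody ('\n' :: List.intercalate ['\n'] lines) =
      if killedAll lines then [] else '\n' :: List.intercalate ['\n'] (spl lines) := by
  induction lines with
  | nil => exact absurd rfl hne
  | cons l ls ih =>
    have hcl_l : '\n' ∉ l := hcl l List.mem_cons_self
    cases ls with
    | nil =>
      rw [intercalate_singleton]
      cases hp : PySem.Chars.startswith l ['#', ' '] with
      | true =>
        -- a lone H1 line: everything is removed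
        have hj : PySem.Chars.find ('\n' :: l) ['\n', '#', ' '] = ((0 : Nat) : Int) := by
          apply find_eq_of
          · rw [List.drop_zero, List.cons_prefix_cons]
            exact ⟨rfl, (PySem.Chars.startswith_iff l ['#', ' ']).1 hp⟩
          · intro k hk; omega
        unfold gBody
        rw [hj]
        have hjne : ¬ (((0 : Nat) : Int) = -1) := by decide
        simp only [hjne, if_false]
        have hidx : ((0 : Nat) : Int) + 1 = ((1 : Nat) : Int) := by decide
        rw [hidx, PySem.Chars.findFrom_natCast _ _ _ (by simp)]
        have hdl : ('\n' :: l).drop 1 = l := by simp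
        rw [hdl, find_nl_clean l hcl_l]
        simp only [if_pos rfl]
        rw [PySem.List.slice_to _ (by decide)]
        have hka : killedAll [l] = true := by simpa [killedAll] using hp
        simp [hka]
      | false =>
        have hj : PySem.Chars.find ('\n' :: l) ['\n', '#', ' '] = -1 := by
          have hs := find_shift l [] hcl_l hp (Or.inl rfl)
          rw [List.append_nil] at hs
          rw [hs, find_nil_sub]
          simp
        unfold gBody
        rw [hj]
        simp only [if_pos rfl]
        have hka : killedAll [l] = false := by simpa [killedAll] using hp
        have hsp : spl [l] = [l] := by
          have h0 : spl ([l] : List (List Char)) = l :: spl [] :=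
            spl_cons_neg l [] hp
          rw [h0]; rfl
        rw [hka, hsp, intercalate_singleton]
        simp
    | cons a ls' =>
      have hneq : (a :: ls' : List (List Char)) ≠ [] := by simp
      have hcl' : ∀ x ∈ a :: ls', '\n' ∉ x := fun x hx => hcl x (List.mem_cons_of_mem l hx)
      have hka : killedAll (l :: a :: ls') = false := rfl
      have hflat : '\n' :: List.intercalate ['\n'] (l :: a :: ls')
          = ('\n' :: l) ++ ('\n' :: List.intercalate ['\n'] (a :: ls')) := by
        rw [intercalate_cons_ne _ _ _ hneq]
        simp
      cases hp : PySem.Chars.startswith l ['#', ' '] with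
      | true =>
        -- head is the H1: cut away '\n'::l, keep the rest
        rw [hflat]
        have hj : PySem.Chars.find (('\n' :: l) ++ ('\n' :: List.intercalate ['\n'] (a :: ls')))
            ['\n', '#', ' '] = ((0 : Nat) : Int) := by
          apply find_eq_of
          · rw [List.drop_zero, List.cons_append, List.cons_prefix_cons]
            exact ⟨rfl, ((PySem.Chars.startswith_iff l ['#', ' ']).1 hp).trans (List.prefix_append l _)⟩
          · intro k hk; omega
        unfold gBody
        rw [hj]
        have hjne : ¬ (((0 : Nat) : Int) = -1) := by decide
        simp only [hjne, if_false]
        have hidx : ((0 : Nat) : Int) + 1 = ((1 : Nat) : Int) := by decide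
        rw [hidx, PySem.Chars.findFrom_natCast _ _ _ (by simp)]
        have hdrop1 : (('\n' :: l) ++ ('\n' :: List.intercalate ['\n'] (a :: ls'))).drop 1
            = l ++ '\n' :: List.intercalate ['\n'] (a :: ls') := by simp
        rw [hdrop1, find_nl_boundary l _ hcl_l]
        rw [if_neg (by omega)]
        rw [if_neg (by omega)]
        rw [PySem.List.slice_to _ (by decide), PySem.List.slice_from _ (by positivity)]
        have ht0 : ((0 : Nat) : Int).toNat = 0 := rfl
        have ht1 : (((1 : Nat) : Int) + (l.length : Int)).toNat = ('\n' :: l).length := by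
          simp; omega
        rw [ht0, ht1, List.take_zero, List.nil_append]
        rw [List.drop_left]
        have hsp : spl (l :: a :: ls') = a :: ls' :=
          spl_cons_pos l (a :: ls') hp
        rw [hka, hsp]
        simp
      | false =>
        rw [hflat, gBody_shift l _ hcl_l hp, ih hneq hcl']
        have hsp : spl (l :: a :: ls') = l :: spl (a :: ls') :=
          spl_cons_neg l (a :: ls') hp
        rw [hsp, hka]
        simp only [Bool.false_eq_true, if_false]
        cases hk2 : killedAll (a :: ls') with
        | true =>
          -- the tail was a lone H1: spl (a::ls') = []
          have hls' : ls' = [] := by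
            cases ls' with
            | nil => rfl
            | cons b t => simp [killedAll] at hk2
          subst hls'
          have hpa : PySem.Chars.startswith a ['#', ' '] = true := by
            simpa [killedAll] using hk2
          have hspa : spl [a] = [] := by
            have h0 := spl_cons_pos a [] hpa
            simpa using h0
          rw [hspa]
          simp [intercalate_singleton]
        | false =>
          simp only [Bool.false_eq_true, if_false, if_true]
          have hsplne : spl (a :: ls') ≠ [] := by
            cases hpa : PySem.Chars.startswith a ['#', ' '] with
            | true =>
              rw [spl_cons_pos a ls' hpa]
              cases ls' with
              | nil => simp [killedAll, hpa] at hk2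
              | cons b t => simp
            | false =>
              rw [spl_cons_neg a ls' hpa]
              simp
          rw [intercalate_cons_ne _ _ _ hsplne]
          simp

theorem dropWhile_nl_cons (x : List Char) :
    List.dropWhile (· == '\n') ('\n' :: x) = List.dropWhile (· == '\n') x := by
  simp [List.dropWhile_cons]

theorem alt_eq (content : String) :
    create_hf_version_alt content =
      String.ofList (hfFrontmatter ++ (gBody ('\n' :: content.toList)).dropWhile (· == '\n')) := rfl

theorem a_eq (content : String) :
    create_hf_version content =
      String.ofList (hfFrontmatter ++
        (PySem.Chars.join "\n".toList (spl (PySem.Chars.splitOn content.toList "\n".toList))).dropWhile (· == '\n')) := by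
  unfold create_hf_version
  simp only [loop_eq_splice, List.nil_append]

-- the two bodies agree after the shared lstrip, for any non-empty clean line list
theorem body_eq (lines : List (List Char)) (hne : lines ≠ []) (hcl : ∀ l ∈ lines, '\n' ∉ l) :
    (gBody ('\n' :: List.intercalate ['\n'] lines)).dropWhile (· == '\n') =
      (List.intercalate ['\n'] (spl lines)).dropWhile (· == '\n') := by
  rw [gBody_flat lines hne hcl]
  cases hk : killedAll lines with
  | true =>
    have hspl : spl lines = [] := by
      cases lines with
      | nil => exact absurd rfl hne
      | cons a t =>
        cases t with
        | nil =>
          have hpa : PySem.Chars.startswith a ['#', ' '] = true := by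
            simpa [killedAll] using hk
          simpa using spl_cons_pos a [] hpa
        | cons b t' => simp [killedAll] at hk
    rw [hspl]
    rfl
  | false =>
    simp only [Bool.false_eq_true, if_false]
    rw [dropWhile_nl_cons]

-- ===== VERDICT (by name: the statement is the Claim_ definition above) =====
theorem create_hf_version_spec : Claim_equal_create_hf_version := by
  intro content _
  unfold Spec_create_hf_version
  rw [a_eq, alt_eq, toList_nl, splitOn_eq]
  have hne := splitOnP_ne_nil (· == '\n') content.toList
  have hcl := splitOnP_clean content.toList
  have hjoin : PySem.Chars.join ['\n'] (spl (List.splitOnP (· == '\n') content.toList))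
      = List.intercalate ['\n'] (spl (List.splitOnP (· == '\n') content.toList)) := rfl
  rw [hjoin]
  rw [show ('\n' :: content.toList)
      = ('\n' :: List.intercalate ['\n'] (List.splitOnP (· == '\n') content.toList)) from by
    rw [splitOnP_intercalate]]
  rw [body_eq _ hne hcl]
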